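-- pv_equiv track=rewrite | github.com/wstanford-wastelinq/wastelinq-portal-automation | lambda-functions/portal-automation-tradebe/tradebe_mapper.py | _determine_physical_state
-- ===== SOURCE A (Python) =====
-- from typing import Dict, Any, List
--
-- def _determine_physical_state(data: Dict[str, Any]) -> str:
--
--     def is_true(value: Any) -> bool:
--         """Helper function to check if a value represents True"""
--         if isinstance(value, bool):
--             return value
--         if isinstance(value, str):
--             return value.upper() in ('TRUE', 'YES', '1')
--         return False
--
--     states = {
--         "SOLID": is_true(data.get("PCPhysicalStateSolid2")),
--         "LIQUID": is_true(data.get("PCPPhysicalStateLiquid2")),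
--         "SLUDGE": is_true(data.get("PCPPhysicalStateSludge2")),
--         "GAS": is_true(data.get("PCPPhysicalStateGas2"))
--     }
--
--     true_states = [state for state, value in states.items() if value]
--
--     # If no states are True, return empty string
--     if not true_states:
--         return ""
--
--     # If multiple states are True, prioritize in this order
--     priority_order = ["LIQUID", "SLUDGE", "SOLID", "GAS"]
--     for state in priority_order:
--         if state in true_states:
--             return state
--
--     # If none of the priority states match, return the first true state
--     return true_states[0]
-- ===== SOURCE B (Python) =====
-- from typing import Dict, Any
--
-- def _determine_physical_state(data: Dict[str, Any]) -> str:
--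
--     def is_true(value: Any) -> bool:
--         if isinstance(value, bool):
--             return value
--         if isinstance(value, str):
--             return value.upper() in ('TRUE', 'YES', '1')
--         return False
--
--     # priority order with the exact source keys (incl. the 'PCPhysicalStateSolid2' spelling)
--     ordered = [
--         ("LIQUID", "PCPPhysicalStateLiquid2"),
--         ("SLUDGE", "PCPPhysicalStateSludge2"),
--         ("SOLID", "PCPhysicalStateSolid2"),
--         ("GAS", "PCPPhysicalStateGas2"),
--     ]
--     for name, key in ordered:
--         if is_true(data.get(key)):
--             return name
--     return ""
-- ===== Notes on version B (the rewrite author's own statement) =====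
-- stated objective: simpler
-- what changed: Replaces the states dict, the true_states comprehension and the two-phase priority scan (plus the dead fallback branch) by one pass over an ordered (state, key) list that returns the first flag that is true.
import Mathlib
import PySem

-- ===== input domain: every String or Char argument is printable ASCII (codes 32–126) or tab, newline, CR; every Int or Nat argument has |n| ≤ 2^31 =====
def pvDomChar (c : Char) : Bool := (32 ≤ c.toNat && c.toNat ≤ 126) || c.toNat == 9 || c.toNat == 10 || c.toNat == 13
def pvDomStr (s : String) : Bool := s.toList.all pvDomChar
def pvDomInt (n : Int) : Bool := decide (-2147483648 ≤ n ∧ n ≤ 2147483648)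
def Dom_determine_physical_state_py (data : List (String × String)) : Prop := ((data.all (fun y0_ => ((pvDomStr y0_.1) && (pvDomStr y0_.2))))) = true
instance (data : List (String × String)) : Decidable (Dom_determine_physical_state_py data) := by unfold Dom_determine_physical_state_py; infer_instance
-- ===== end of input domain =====

-- B replaces A's states dict + true_states comprehension + two-phase priority scan (and dead
-- fallback) by one pass over an ordered (state, key) list; objective: simpler.


-- shared helper: Python's local `is_true` applied to `data.get(key)` (values here are strings,
-- so only the str branch of is_true can fire; None gives False); identical in A and B.
def pyIsTrue (v : Option String) : Bool :=
  match v with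
  | none => false
  | some s => ["TRUE", "YES", "1"].contains (PySem.Str.upper s)

-- data.get(key): first-match lookup in the insertion-ordered dict
def pyGetK (data : List (String × String)) (k : String) : Option String :=
  (PySem.Dict.mk data).get? k

-- ===== PORT A =====
-- the `for state in priority_order: if state in true_states: return state` loop,
-- falling through to `return true_states[0]` (dead code in A; ported as written, with
-- the IndexError-free default "" — the branch is unreachable since true_states ≠ []).
def aPriorityLoop (priority : List String) (true_states : List String) : String :=
  match priority with
  | [] => (PySem.List.pyGet? true_states 0).getD ""
  | st :: rest => if true_states.contains st then st else aPriorityLoop rest true_states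

def determine_physical_state_py (data : List (String × String)) : String :=
  let states : PySem.Dict String Bool :=
    ((((PySem.Dict.empty.insert "SOLID" (pyIsTrue (pyGetK data "PCPhysicalStateSolid2"))).insert
        "LIQUID" (pyIsTrue (pyGetK data "PCPPhysicalStateLiquid2"))).insert
        "SLUDGE" (pyIsTrue (pyGetK data "PCPPhysicalStateSludge2"))).insert
        "GAS" (pyIsTrue (pyGetK data "PCPPhysicalStateGas2")))
  let true_states : List String := (states.items.filter (fun p => p.2)).map (fun p => p.1)
  if true_states = [] then ""
  else aPriorityLoop ["LIQUID", "SLUDGE", "SOLID", "GAS"] true_states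

-- ===== PORT B =====
def bOrdered : List (String × String) :=
  [("LIQUID", "PCPPhysicalStateLiquid2"),
   ("SLUDGE", "PCPPhysicalStateSludge2"),
   ("SOLID", "PCPhysicalStateSolid2"),
   ("GAS", "PCPPhysicalStateGas2")]

def bScan (data : List (String × String)) (ordered : List (String × String)) : String :=
  match ordered with
  | [] => ""
  | (name, key) :: rest => if pyIsTrue (pyGetK data key) then name else bScan data rest

def determine_physical_state_py_alt (data : List (String × String)) : String :=
  bScan data bOrdered

-- ===== PRECONDITION & SPEC =====
def Spec_determine_physical_state_py (data : List (String × String)) (out : String) : Prop := out = determine_physical_state_py_alt data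
instance (data : List (String × String)) (out : String) : Decidable (Spec_determine_physical_state_py data out) := by unfold Spec_determine_physical_state_py; infer_instance

-- ===== CLAIM (what is proved, stated in full; the proofs are below) =====
def Claim_equal_determine_physical_state_py : Prop := ∀ (data : List (String × String)), Dom_determine_physical_state_py data → Spec_determine_physical_state_py data (determine_physical_state_py data)

-- ===== LEMMAS AND PROOFS =====

-- ===== VERDICT (by name: the statement is the Claim_ definition above) =====
theorem determine_physical_state_py_spec : Claim_equal_determine_physical_state_py := by
  intro data _
  unfold Spec_determine_physical_state_py
  simp only [determine_physical_state_py, determine_physical_state_py_alt, bScan, bOrdered]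
  generalize pyIsTrue (pyGetK data "PCPhysicalStateSolid2") = bs
  generalize pyIsTrue (pyGetK data "PCPPhysicalStateLiquid2") = bl
  generalize pyIsTrue (pyGetK data "PCPPhysicalStateSludge2") = bsl
  generalize pyIsTrue (pyGetK data "PCPPhysicalStateGas2") = bg
  cases bs <;> cases bl <;> cases bsl <;> cases bg <;> rfl
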